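-- pv_equiv track=rewrite | github.com/johnab20/Test-Corrections | JBTestCorrections.py | family_dictionary_maker
-- ===== SOURCE A (Python) =====
-- def family_dictionary_maker(list):
--     family_counts = {}
--     for protein in list:
--         family = protein.split('.')[0]
--         if family in family_counts:
--             family_counts[family] += 1
--         else:
--             family_counts[family] = 1
--     return family_counts
-- ===== SOURCE B (Python) =====
-- def family_dictionary_maker(list):
--     ps = [p.split('.')[0] for p in list]
--     out = {}
--     while ps:
--         head = ps[0]
--         rest = [q for q in ps[1:] if q != head]
--         out[head] = len(ps) - len(rest)
--         ps = rest
--     return out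
-- ===== Notes on version B (the rewrite author's own statement) =====
-- stated objective: alternative
-- what changed: Replaces the incremental hash-counting loop by a pivot-partition worklist: repeatedly take the first remaining prefix, filter its occurrences out of the worklist (its count is the length drop), and continue on the residue; no counting dictionary is maintained.
import Mathlib
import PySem

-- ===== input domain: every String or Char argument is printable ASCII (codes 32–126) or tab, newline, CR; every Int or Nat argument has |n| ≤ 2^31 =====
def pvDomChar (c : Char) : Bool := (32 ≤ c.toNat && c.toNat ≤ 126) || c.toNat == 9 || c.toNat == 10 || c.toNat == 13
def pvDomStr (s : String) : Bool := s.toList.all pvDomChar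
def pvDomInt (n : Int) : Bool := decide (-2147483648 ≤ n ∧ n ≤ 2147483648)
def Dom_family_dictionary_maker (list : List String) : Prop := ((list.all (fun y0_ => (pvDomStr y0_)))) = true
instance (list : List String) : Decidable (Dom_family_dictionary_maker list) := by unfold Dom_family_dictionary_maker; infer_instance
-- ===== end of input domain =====

-- B replaces A's incremental dict-counting loop by a pivot-partition worklist: take the first remaining prefix, filter its occurrences out (count = length drop), continue on the residue; alternative decomposition, same results.


-- ===== PORT A =====
-- protein.split('.')[0]  (splitOn always returns a nonempty list, so index 0 is safe; pyGetD with default "")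
def pvPrefix (protein : String) : String :=
  String.ofList (PySem.List.pyGetD (PySem.Chars.splitOn protein.toList ['.']) 0 [])

def family_dictionary_maker (list : List String) : List (String × Int) :=
  (list.foldl (fun family_counts protein =>
      let family := pvPrefix protein
      if family_counts.contains family then
        family_counts.insert family (family_counts.getD family 0 + 1)
      else
        family_counts.insert family 1)
    (PySem.Dict.empty : PySem.Dict String Int)).items

-- ===== PORT B =====
-- go(ps): pivot = ps[0]; rest = elements of ps[1:] different from the pivot; count = len(ps) - len(rest)
def pvGo : List String → List (String × Int)
  | [] => []
  | x :: xs =>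
      let rest := xs.filter (fun q => q ≠ x)
      (x, ((xs.length + 1 - rest.length : Nat) : Int)) :: pvGo rest
termination_by l => l.length
decreasing_by
  simp only [List.unattach, List.length_map, List.length_cons]
  exact Nat.lt_succ_of_le ((List.length_filter_le _ _).trans (le_of_eq List.length_attach))

def family_dictionary_maker_alt (list : List String) : List (String × Int) :=
  pvGo (list.map pvPrefix)

-- ===== PRECONDITION & SPEC =====
def Spec_family_dictionary_maker (list : List String) (out : List (String × Int)) : Prop := out = family_dictionary_maker_alt list
instance (list : List String) (out : List (String × Int)) : Decidable (Spec_family_dictionary_maker list out) := by unfold Spec_family_dictionary_maker; infer_instance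

-- ===== CLAIM (what is proved, stated in full; the proofs are below) =====
def Claim_equal_family_dictionary_maker : Prop := ∀ (list : List String), Dom_family_dictionary_maker list → Spec_family_dictionary_maker list (family_dictionary_maker list)

-- ===== LEMMAS AND PROOFS =====

-- A's loop body equals the canonical counter step on each element.
theorem pvStep_eq (d : PySem.Dict String Int) (x : String) :
    (if d.contains x then d.insert x (d.getD x 0 + 1) else d.insert x 1)
      = d.insert x (d.getD x 0 + 1) := by
  by_cases h : d.contains x = true
  · simp [h]
  · simp only [Bool.not_eq_true] at h
    rw [PySem.Dict.getD_of_not_contains d (0 : Int) h]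
    simp [h]

-- adding an element already present leaves the set unchanged
theorem pvAdd_mem {α : Type} [DecidableEq α] (s : PySem.Set α) (x : α) (hx : x ∈ s) :
    PySem.Set.add s x = s := by
  simp [PySem.Set.add, PySem.Set.contains, hx]

-- elements equal to an element of s are skipped by Set.add, so filtering them away changes nothing
theorem pvFoldl_add_filter {α : Type} [DecidableEq α] (x : α) (xs : List α) (s : PySem.Set α)
    (hx : x ∈ s) :
    xs.foldl PySem.Set.add s = (xs.filter (fun q => q ≠ x)).foldl PySem.Set.add s := by
  induction xs generalizing s with
  | nil => rfl
  | cons y ys ih =>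
    by_cases hyx : y = x
    · have hfil : (y :: ys).filter (fun q => q ≠ x) = ys.filter (fun q => q ≠ x) := by
        simp [hyx]
      rw [hfil, List.foldl_cons, hyx, pvAdd_mem s x hx]
      exact ih s hx
    · have hfil : (y :: ys).filter (fun q => q ≠ x) = y :: ys.filter (fun q => q ≠ x) := by
        simp [hyx]
      have hx' : x ∈ PySem.Set.add s y := by
        simp [PySem.Set.add]; split
        · exact hx
        · exact List.mem_append_left _ hx
      rw [hfil, List.foldl_cons, List.foldl_cons]
      exact ih _ hx'

-- an element absent from the rest of the input stays at the head throughout the fold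
theorem pvFoldl_add_cons {α : Type} [DecidableEq α] (a : α) (ys : List α) (s : PySem.Set α)
    (h : ∀ y ∈ ys, y ≠ a) :
    ys.foldl PySem.Set.add (a :: s) = a :: ys.foldl PySem.Set.add s := by
  induction ys generalizing s with
  | nil => rfl
  | cons y ys ih =>
    have hya : y ≠ a := h y (by simp)
    have hstep : PySem.Set.add (a :: s) y = a :: PySem.Set.add s y := by
      simp only [PySem.Set.add, PySem.Set.contains, List.contains_cons]
      have : (y == a) = false := by simp [hya]
      rw [this]
      simp only [Bool.false_or]
      split <;> simp
    rw [List.foldl_cons, hstep, List.foldl_cons, ih _ (fun z hz => h z (by simp [hz]))]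

-- first-occurrence dedup unfolds along the pivot partition
theorem pvOfList_cons {α : Type} [DecidableEq α] (x : α) (xs : List α) :
    PySem.Set.ofList (x :: xs) = x :: PySem.Set.ofList (xs.filter (fun q => q ≠ x)) := by
  have h1 : PySem.Set.ofList (x :: xs) = xs.foldl PySem.Set.add [x] := by
    simp [PySem.Set.ofList_eq_foldl, PySem.Set.add, PySem.Set.contains]
  rw [h1, pvFoldl_add_filter x xs [x] (by simp),
      pvFoldl_add_cons x _ [] (by intro y hy; simpa using (List.of_mem_filter hy)),
      PySem.Set.ofList_eq_foldl]

-- the length drop of the pivot filter is the pivot's count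
theorem pvLen_sub_count (x : String) (xs : List String) :
    xs.length - (xs.filter (fun q => q ≠ x)).length = xs.count x := by
  induction xs with
  | nil => rfl
  | cons y ys ih =>
    have hle := List.length_filter_le (fun q => decide (q ≠ x)) ys
    by_cases hyx : y = x
    · have hfil : (y :: ys).filter (fun q => q ≠ x) = ys.filter (fun q => q ≠ x) := by
        simp [hyx]
      have hcnt : (y :: ys).count x = ys.count x + 1 := by
        simp [hyx]
      rw [hfil, hcnt, List.length_cons]
      omega
    · have hfil : ((y :: ys).filter (fun q => q ≠ x)).length
          = (ys.filter (fun q => q ≠ x)).length + 1 := by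
        simp [hyx]
      have hcnt : (y :: ys).count x = ys.count x := by
        simp [hyx]
      rw [hfil, hcnt, List.length_cons]
      omega

-- unattach commutes with a filter over attach (bridges the equation compiler's attach form)
theorem pvUnattach_filter_attach {α : Type} (p : α → Bool) (xs : List α)
    (f : {a // a ∈ xs} → Bool) (hf : ∀ a, f a = p a.val) :
    (xs.attach.filter f).unattach = xs.filter p := by
  have h : xs.attach.filter f = xs.attach.filter (fun a => p a.val) :=
    List.filter_congr (fun a _ => hf a)
  rw [h]
  simp [List.unattach_filter]

-- B's partition recursion computes exactly dedup-with-counts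
theorem pvGo_eq (l : List String) :
    pvGo l = (PySem.Set.ofList l).map (fun k => (k, (l.count k : Int))) := by
  induction l using pvGo.induct with
  | case1 => simp [pvGo, PySem.Set.ofList]
  | case2 x xs rest ih =>
    unfold pvGo
    rw [pvOfList_cons, List.map_cons]
    refine congrArg₂ _ ?_ ?_
    · have h := pvLen_sub_count x xs
      have hle := List.length_filter_le (fun q => decide (q ≠ x)) xs
      have hcnt : (x :: xs).count x = xs.count x + 1 := by simp
      rw [hcnt]
      congr 1
      omega
    · have hrest : rest = xs.filter (fun q => q ≠ x) := by
        simp only [rest]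
        exact pvUnattach_filter_attach (fun q => decide (q ≠ x)) xs _ (fun a => by cases a; rfl)
      rw [hrest] at ih
      rw [ih]
      apply List.map_congr_left
      intro k hk
      have hk' : k ∈ xs.filter (fun q => q ≠ x) :=
        (PySem.Set.mem_ofList _ _).mp hk
      have hkx : k ≠ x := by simpa using (List.of_mem_filter hk')
      have hcnt : (xs.filter (fun q => q ≠ x)).count k = xs.count k := by
        rw [List.count_filter]
        simp [hkx]
      have : (x :: xs).count k = xs.count k := by simp [Ne.symm hkx]
      rw [this, ← hcnt]

-- ===== VERDICT (by name: the statement is the Claim_ definition above) =====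
theorem family_dictionary_maker_spec : Claim_equal_family_dictionary_maker := by
  intro list _
  simp only [Spec_family_dictionary_maker, family_dictionary_maker, family_dictionary_maker_alt]
  have hf : (fun (d : PySem.Dict String Int) (p : String) =>
        if d.contains (pvPrefix p) then d.insert (pvPrefix p) (d.getD (pvPrefix p) 0 + 1)
        else d.insert (pvPrefix p) 1)
      = fun d p => d.insert (pvPrefix p) (d.getD (pvPrefix p) 0 + 1) := by
    funext d p; exact pvStep_eq d (pvPrefix p)
  rw [hf]
  rw [show (List.foldl (fun (d : PySem.Dict String Int) (p : String) =>
          d.insert (pvPrefix p) (d.getD (pvPrefix p) 0 + 1)) PySem.Dict.empty list)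
      = List.foldl (fun d x => d.insert x (d.getD x 0 + 1)) PySem.Dict.empty (list.map pvPrefix)
    from (List.foldl_map (f := pvPrefix) (g := fun (d : PySem.Dict String Int) x => d.insert x (d.getD x 0 + 1)) (l := list) (init := PySem.Dict.empty)).symm]
  rw [PySem.Dict.foldl_insert_getD_add_one_eq_counter, PySem.Dict.items_counter, pvGo_eq]
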